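-- pv_equiv track=rewrite | github.com/need-singularity/sylvian-singularity | verify/verify_round3_math.py | fubini_number
-- ===== SOURCE A (Python) =====
-- import math
--
-- def binomial(n, k):
--     if k < 0 or k > n:
--         return 0
--     return math.comb(n, k)
--
-- def fubini_number(n):
--     """Ordered Bell number (Fubini number) a(n) = sum_{k=0}^{n} k! * S(n,k)."""
--     # Using inclusion-exclusion: a(n) = sum_{k=0}^{n} sum_{j=0}^{k} (-1)^(k-j) C(k,j) j^n
--     total = 0
--     for k in range(n+1):
--         s = 0
--         for j in range(k+1):
--             s += ((-1)**(k-j)) * binomial(k, j) * (j**n)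
--         total += s
--     return total
-- ===== SOURCE B (Python) =====
-- def fubini_number(n):
--     """Ordered Bell number via the surjection-count triangle T(m,k) = k*(T(m-1,k-1)+T(m-1,k))."""
--     if n < 0:
--         return 0
--     row = [1]  # row m holds T(m, k) for k = 0..m; a(n) = sum of row n
--     for _ in range(n):
--         row = [0] + [k * (row[k - 1] + (row[k] if k < len(row) else 0))
--                      for k in range(1, len(row) + 1)]
--     return sum(row)
-- ===== Notes on version B (the rewrite author's own statement) =====
-- stated objective: faster
-- what changed: Replaces the double inclusion-exclusion sum with its k!*S(n,k) terms (binomials and n-th powers recomputed for every (k,j)) by a dynamic-programming pass over the surjection-count triangle T(m,k)=k*(T(m-1,k-1)+T(m-1,k)), summing the last row.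
import Mathlib
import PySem

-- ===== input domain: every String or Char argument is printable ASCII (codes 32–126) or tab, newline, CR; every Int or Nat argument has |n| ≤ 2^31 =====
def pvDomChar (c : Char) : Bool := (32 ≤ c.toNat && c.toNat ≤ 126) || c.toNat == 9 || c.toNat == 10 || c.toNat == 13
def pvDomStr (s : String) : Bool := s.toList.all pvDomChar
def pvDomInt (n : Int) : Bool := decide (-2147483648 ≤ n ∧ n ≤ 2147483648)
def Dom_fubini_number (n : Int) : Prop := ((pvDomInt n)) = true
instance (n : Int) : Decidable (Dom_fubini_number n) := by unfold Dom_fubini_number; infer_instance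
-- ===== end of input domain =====

-- B replaces A's double inclusion-exclusion sum by the surjection-count triangle DP
-- T(m,k) = k*(T(m-1,k-1)+T(m-1,k)); measurably faster (fewer big-integer operations).

-- ===== PORT A =====
def binomial (n k : Int) : Int :=
  if k < 0 ∨ k > n then 0
  else (Nat.choose n.toNat k.toNat : Int)   -- guard gives 0 ≤ k ≤ n, so math.comb(n,k) = choose on Nat

def fubini_number (n : Int) : Int :=
  (PySem.List.pyRange 0 (n + 1) 1).foldl (fun total k =>
    total + (PySem.List.pyRange 0 (k + 1) 1).foldl (fun s j =>
      -- (-1)**(k-j): exact since 0 ≤ j ≤ k in the loop; j**n: exact since the loop only runs for n ≥ 0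
      s + (-1 : Int) ^ (k - j).toNat * binomial k j * j ^ n.toNat) 0) 0

-- ===== PORT B =====
-- row[k-1] / row[k]: indices are in range whenever read, so getD's default is never used
def fubiniStep (row : List Int) : List Int :=
  0 :: (PySem.List.pyRange 1 ((row.length : Int) + 1) 1).map (fun k =>
    k * (row.getD (k - 1).toNat 0 +
         if k < (row.length : Int) then row.getD k.toNat 0 else 0))

def fubini_number_alt (n : Int) : Int :=
  if n < 0 then 0
  else ((PySem.List.pyRange 0 n 1).foldl (fun row _ => fubiniStep row) [1]).sum

-- ===== PRECONDITION & SPEC =====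
def Spec_fubini_number (n : Int) (out : Int) : Prop := out = fubini_number_alt n
instance (n : Int) (out : Int) : Decidable (Spec_fubini_number n out) := by unfold Spec_fubini_number; infer_instance

-- ===== CLAIM (what is proved, stated in full; the proofs are below) =====
def Claim_equal_fubini_number : Prop := ∀ (n : Int), Dom_fubini_number n → Spec_fubini_number n (fubini_number n)

-- ===== LEMMAS AND PROOFS =====

/-- Number of surjections [m] → [k] as the inclusion-exclusion alternating sum
(sign written as (-1)^(k+j), same parity as k-j). -/
def surjS (m k : Nat) : Int :=
  ∑ j ∈ Finset.range (k + 1), (-1 : Int) ^ (k + j) * (Nat.choose k j : Int) * (j : Int) ^ m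

theorem surjS_zero_zero : surjS 0 0 = 1 := by
  simp [surjS]

theorem surjS_zero_succ (k : Nat) : surjS 0 (k + 1) = 0 := by
  have h := @Int.alternating_sum_range_choose (k + 1)
  rw [if_neg (Nat.succ_ne_zero k)] at h
  calc surjS 0 (k + 1)
      = ∑ j ∈ Finset.range (k + 2), (-1 : Int) ^ (k + 1) * ((-1) ^ j * (Nat.choose (k+1) j : Int)) := by
        unfold surjS
        refine Finset.sum_congr rfl (fun j _ => ?_)
        rw [pow_add]; ring
    _ = (-1 : Int) ^ (k + 1) * ∑ j ∈ Finset.range (k + 2), (-1 : Int) ^ j * (Nat.choose (k+1) j : Int) := by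
        rw [Finset.mul_sum]
    _ = 0 := by rw [h]; ring

theorem surjS_succ_zero (m : Nat) : surjS (m + 1) 0 = 0 := by
  simp [surjS]

/-- The inner exchange: ∑_{i≤k} (-1)^(k+i) C(k,i) (i+1)^m = surjS m k + surjS m (k+1). -/
theorem surjS_exchange (m k : Nat) :
    ∑ i ∈ Finset.range (k + 1), (-1 : Int) ^ (k + i) * (Nat.choose k i : Int) * ((i : Int) + 1) ^ m
      = surjS m k + surjS m (k + 1) := by
  have hsucc : surjS m (k + 1)
      = ∑ i ∈ Finset.range (k + 1),
          (-1 : Int) ^ (k + i) * ((Nat.choose k i : Int) + (Nat.choose k (i+1) : Int)) * ((i : Int) + 1) ^ m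
        + (-1 : Int) ^ (k + 1) * (0 : Int) ^ m := by
    unfold surjS
    rw [Finset.sum_range_succ' (fun j => (-1 : Int) ^ (k + 1 + j) * (Nat.choose (k+1) j : Int) * (j : Int) ^ m)]
    have hc : ∀ i ∈ Finset.range (k + 1),
        (-1 : Int) ^ (k + 1 + (i + 1)) * (Nat.choose (k+1) (i+1) : Int) * ((i + 1 : Nat) : Int) ^ m
        = (-1 : Int) ^ (k + i) * ((Nat.choose k i : Int) + (Nat.choose k (i+1) : Int)) * ((i : Int) + 1) ^ m := by
      intro i _
      have hsg : (-1 : Int) ^ (k + 1 + (i + 1)) = (-1) ^ (k + i) := by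
        have h2 : k + 1 + (i + 1) = (k + i) + 2 := by ring
        rw [h2, pow_add]; norm_num
      rw [hsg, Nat.choose_succ_succ]
      push_cast
      ring
    rw [Finset.sum_congr rfl hc]
    simp only [Nat.choose_zero_right, Nat.cast_one, Nat.cast_zero]
    ring
  -- the C(k,i+1) part of hsucc is -surjS m k + (-1)^k * 0^m
  have hshift : ∑ i ∈ Finset.range (k + 1), (-1 : Int) ^ (k + i) * (Nat.choose k (i+1) : Int) * ((i : Int) + 1) ^ m
      = -surjS m k + (-1 : Int) ^ k * (0 : Int) ^ m := by
    have hτ : surjS m k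
        = ∑ i ∈ Finset.range k, (-1 : Int) ^ (k + (i + 1)) * (Nat.choose k (i+1) : Int) * ((i : Int) + 1) ^ m
          + (-1 : Int) ^ k * (0 : Int) ^ m := by
      unfold surjS
      rw [Finset.sum_range_succ' (fun j => (-1 : Int) ^ (k + j) * (Nat.choose k j : Int) * (j : Int) ^ m)]
      have hc : ∀ i ∈ Finset.range k,
          (-1 : Int) ^ (k + (i + 1)) * (Nat.choose k (i+1) : Int) * ((i + 1 : Nat) : Int) ^ m
          = (-1 : Int) ^ (k + (i + 1)) * (Nat.choose k (i+1) : Int) * ((i : Int) + 1) ^ m := by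
        intro i _; norm_num
      rw [Finset.sum_congr rfl hc]
      simp only [Nat.choose_zero_right, Nat.cast_one, Nat.cast_zero]
      ring
    rw [Finset.sum_range_succ]
    rw [Nat.choose_eq_zero_of_lt (Nat.lt_succ_self k)]
    have : ∑ i ∈ Finset.range k, (-1 : Int) ^ (k + i) * (Nat.choose k (i+1) : Int) * ((i : Int) + 1) ^ m
        = -∑ i ∈ Finset.range k, (-1 : Int) ^ (k + (i + 1)) * (Nat.choose k (i+1) : Int) * ((i : Int) + 1) ^ m := by
      rw [← Finset.sum_neg_distrib]
      refine Finset.sum_congr rfl (fun i _ => ?_)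
      rw [pow_add, pow_add]; ring
    rw [this]
    rw [hτ]
    push_cast
    ring
  have hdistr : ∀ i ∈ Finset.range (k + 1),
      (-1 : Int) ^ (k + i) * ((Nat.choose k i : Int) + (Nat.choose k (i+1) : Int)) * ((i : Int) + 1) ^ m
      = (-1 : Int) ^ (k + i) * (Nat.choose k i : Int) * ((i : Int) + 1) ^ m
        + (-1 : Int) ^ (k + i) * (Nat.choose k (i+1) : Int) * ((i : Int) + 1) ^ m := by
    intro i _; ring
  rw [Finset.sum_congr rfl hdistr, Finset.sum_add_distrib, hshift] at hsucc
  have hz : (-1 : Int) ^ (k + 1) * (0 : Int) ^ m + (-1 : Int) ^ k * (0 : Int) ^ m = 0 := by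
    rw [pow_succ]; ring
  linarith [hsucc]

/-- The triangle recurrence, proved from the alternating-sum formula. -/
theorem surjS_rec (m k : Nat) :
    surjS (m + 1) (k + 1) = ((k : Int) + 1) * (surjS m k + surjS m (k + 1)) := by
  have habs : ∀ i : Nat, (Nat.choose (k+1) (i+1) : Int) * ((i : Int) + 1) = ((k : Int) + 1) * (Nat.choose k i : Int) := by
    intro i
    have h := Nat.add_one_mul_choose_eq k i
    exact_mod_cast h.symm
  calc surjS (m + 1) (k + 1)
      = ∑ i ∈ Finset.range (k + 1),
          (-1 : Int) ^ (k + i) * ((Nat.choose (k+1) (i+1) : Int) * ((i : Int) + 1)) * ((i : Int) + 1) ^ m := by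
        unfold surjS
        rw [Finset.sum_range_succ' (fun j => (-1 : Int) ^ (k + 1 + j) * (Nat.choose (k+1) j : Int) * (j : Int) ^ (m+1))]
        have h0 : ((0 : Nat) : Int) ^ (m + 1) = 0 := by simp
        rw [h0]
        simp only [mul_zero, add_zero]
        refine Finset.sum_congr rfl (fun i _ => ?_)
        have hsg : (-1 : Int) ^ (k + 1 + (i + 1)) = (-1) ^ (k + i) := by
          have : k + 1 + (i + 1) = (k + i) + 2 := by ring
          rw [this, pow_add]; norm_num
        rw [hsg]
        push_cast
        ring
    _ = ((k : Int) + 1) * ∑ i ∈ Finset.range (k + 1),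
          (-1 : Int) ^ (k + i) * (Nat.choose k i : Int) * ((i : Int) + 1) ^ m := by
        rw [Finset.mul_sum]
        refine Finset.sum_congr rfl (fun i _ => ?_)
        rw [habs i]; ring
    _ = ((k : Int) + 1) * (surjS m k + surjS m (k + 1)) := by rw [surjS_exchange]

/-- Finite differences of a degree-m power vanish above m. -/
theorem surjS_eq_zero_of_lt : ∀ m k : Nat, m < k → surjS m k = 0 := by
  intro m
  induction m with
  | zero =>
    intro k hk
    match k, hk with
    | k + 1, _ => exact surjS_zero_succ k
  | succ m ih =>
    intro k hk
    match k, hk with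
    | k + 1, hk =>
      rw [surjS_rec m k, ih k (by omega), ih (k+1) (by omega)]
      ring

-- ---------- A's side: the double loop is the double sum ----------

theorem sum_map_range (f : Nat → Int) (n : Nat) :
    ((List.range n).map f).sum = ∑ k ∈ Finset.range n, f k := by
  induction n with
  | zero => simp
  | succ n ih =>
    rw [List.range_succ, List.map_append, List.sum_append, Finset.sum_range_succ, ih]
    simp

theorem parity_pow (a b : Int) (hb : 0 ≤ b) (hle : b ≤ a) :
    (-1 : Int) ^ (a - b).toNat = (-1 : Int) ^ (a.toNat + b.toNat) := by
  have h : a.toNat + b.toNat = (a - b).toNat + 2 * b.toNat := by omega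
  rw [h, pow_add, pow_mul]
  norm_num

theorem inner_loop_eq (N ka : Nat) :
    (PySem.List.pyRange 0 ((ka : Int) + 1) 1).foldl (fun s j =>
      s + (-1 : Int) ^ (((ka : Int)) - j).toNat * binomial ka j * j ^ N) 0 = surjS N ka := by
  rw [PySem.List.pyRange_one]
  have hlen : (((ka : Int) + 1) - 0).toNat = ka + 1 := by omega
  rw [hlen, List.foldl_map, PySem.List.foldl_add]
  rw [zero_add, sum_map_range]
  unfold surjS
  refine Finset.sum_congr rfl (fun j hj => ?_)
  have hj' : j ≤ ka := by
    have := Finset.mem_range.mp hj; omega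
  simp only [zero_add]
  have hsign : (-1 : Int) ^ (((ka : Int)) - (j : Int)).toNat = (-1 : Int) ^ (ka + j) := by
    rw [parity_pow (ka : Int) (j : Int) (by positivity) (by exact_mod_cast hj')]
    simp
  have hbin : binomial (ka : Int) (j : Int) = (Nat.choose ka j : Int) := by
    unfold binomial
    rw [if_neg (by omega)]
    simp
  rw [hsign, hbin]

theorem portA_eq_sum (n : Int) (hn : 0 ≤ n) :
    fubini_number n = ∑ k ∈ Finset.range (n.toNat + 1), surjS n.toNat k := by
  unfold fubini_number
  rw [PySem.List.pyRange_one]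
  have hlen : ((n + 1) - 0).toNat = n.toNat + 1 := by omega
  rw [hlen, List.foldl_map, PySem.List.foldl_add]
  rw [zero_add, sum_map_range]
  refine Finset.sum_congr rfl (fun k _ => ?_)
  simp only [zero_add]
  exact inner_loop_eq n.toNat k

-- ---------- B's side: the row invariant ----------

theorem foldl_ignore {α β : Type} (f : α → α) (l : List β) (init : α) :
    l.foldl (fun a _ => f a) init = f^[l.length] init := by
  induction l generalizing init with
  | nil => rfl
  | cons x t ih => simp [List.foldl_cons, ih, Function.iterate_succ_apply]

theorem fubiniStep_row (m : Nat) :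
    fubiniStep ((List.range (m + 1)).map (fun k => surjS m k))
      = (List.range (m + 2)).map (fun k => surjS (m + 1) k) := by
  unfold fubiniStep
  set row := (List.range (m + 1)).map (fun k => surjS m k) with hrow
  have hlen : (row.length : Int) = (m : Int) + 1 := by
    simp [hrow]
  rw [hlen]
  rw [PySem.List.pyRange_one]
  have hcnt : (((m : Int) + 1 + 1) - 1).toNat = m + 1 := by omega
  rw [hcnt, List.map_map]
  conv_rhs => rw [List.range_succ_eq_map, List.map_cons]
  have h0 : surjS (m + 1) 0 = 0 := surjS_succ_zero m
  rw [h0, List.map_map]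
  congr 1
  refine List.map_congr_left (fun i hi => ?_)
  have hi' : i < m + 1 := List.mem_range.mp hi
  simp only [Function.comp_apply]
  have hk1 : ((1 : Int) + (i : Int) - 1).toNat = i := by omega
  have hk2 : ((1 : Int) + (i : Int)).toNat = i + 1 := by omega
  rw [hk1, hk2]
  have hget1 : row.getD i 0 = surjS m i := by
    rw [hrow]; exact PySem.List.getD_map_range _ _ _ _ hi'
  rw [hget1]
  by_cases hlt : (1 : Int) + (i : Int) < (m : Int) + 1
  · have hi2 : i + 1 < m + 1 := by exact_mod_cast (by omega : (i : Int) + 1 < (m : Int) + 1)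
    rw [if_pos hlt]
    have hget2 : row.getD (i + 1) 0 = surjS m (i + 1) := by
      rw [hrow]; exact PySem.List.getD_map_range _ _ _ _ hi2
    rw [hget2, surjS_rec m i]
    ring
  · have him : i = m := by omega
    rw [if_neg hlt, him]
    rw [surjS_rec m m, surjS_eq_zero_of_lt m (m + 1) (by omega)]
    ring

theorem iterate_row (m : Nat) :
    fubiniStep^[m] [1] = (List.range (m + 1)).map (fun k => surjS m k) := by
  induction m with
  | zero => simp [surjS_zero_zero]
  | succ m ih =>
    rw [Function.iterate_succ_apply', ih, fubiniStep_row]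

-- ===== VERDICT (by name: the statement is the Claim_ definition above) =====
theorem fubini_number_spec : Claim_equal_fubini_number := by
  intro n _
  unfold Spec_fubini_number fubini_number_alt
  by_cases hn : n < 0
  · rw [if_pos hn]
    unfold fubini_number
    rw [PySem.List.pyRange_one_eq_nil (by omega)]
    rfl
  · rw [if_neg hn]
    push Not at hn
    rw [foldl_ignore, PySem.List.length_pyRange_one]
    have : (n - 0).toNat = n.toNat := by omega
    rw [this, iterate_row, sum_map_range, portA_eq_sum n hn]
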